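-- pv_equiv track=rewrite | github.com/petrmau/ROSETTADB | harmonise/enrich_amr_r.py | sort_atcs
-- ===== SOURCE A (Python) =====
-- ATC_PRIORITY = ["J", "Q", "P", "D", "A", "L", "B", "C", "G", "H", "M", "N", "R", "S", "V"]
--
-- def sort_atcs(atc_field: str) -> str:
--     """
--     Return all ATC codes from a comma-separated field, sorted by ATC_PRIORITY
--     (J first, then Q, then others).  Duplicate and NA values are dropped.
--     Returns an empty string when nothing useful is present.
--     """
--     if not atc_field or atc_field.strip().upper() == "NA":
--         return ""
--     codes_raw = [c.strip() for c in atc_field.split(",")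
--                  if c.strip() and c.strip().upper() != "NA"]
--     # deduplicate, preserving first occurrence before sorting
--     seen: set[str] = set()
--     codes: list[str] = []
--     for c in codes_raw:
--         if c not in seen:
--             seen.add(c)
--             codes.append(c)
--     if not codes:
--         return ""
--
--     def _rank(code: str) -> int:
--         letter = code[0].upper() if code else "Z"
--         try:
--             return ATC_PRIORITY.index(letter)
--         except ValueError:
--             return len(ATC_PRIORITY)
--
--     return ",".join(sorted(codes, key=_rank))
-- ===== SOURCE B (Python) =====
-- ATC_PRIORITY = ["J", "Q", "P", "D", "A", "L", "B", "C", "G", "H", "M", "N", "R", "S", "V"]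
--
-- def sort_atcs(atc_field: str) -> str:
--     """Bucket (counting) sort by ATC_PRIORITY rank, fused with dedup in one pass."""
--     if not atc_field or atc_field.strip().upper() == "NA":
--         return ""
--     n = len(ATC_PRIORITY)
--     buckets = [[] for _ in range(n + 1)]
--     seen = set()
--     for part in atc_field.split(","):
--         code = part.strip()
--         if not code or code.upper() == "NA" or code in seen:
--             continue
--         seen.add(code)
--         try:
--             r = ATC_PRIORITY.index(code[0].upper())
--         except ValueError:
--             r = n
--         buckets[r].append(code)
--     out = []
--     for bucket in buckets:
--         out.extend(bucket)
--     return ",".join(out)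
-- ===== Notes on version B (the rewrite author's own statement) =====
-- stated objective: alternative
-- what changed: Replaces the comparison sort (sorted with a rank key) after a separate filter+dedup pass by a single fused pass that filters, dedups and bucket-sorts the codes into one bucket per priority rank plus an 'other' bucket, then flattens the buckets in order.
import Mathlib
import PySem

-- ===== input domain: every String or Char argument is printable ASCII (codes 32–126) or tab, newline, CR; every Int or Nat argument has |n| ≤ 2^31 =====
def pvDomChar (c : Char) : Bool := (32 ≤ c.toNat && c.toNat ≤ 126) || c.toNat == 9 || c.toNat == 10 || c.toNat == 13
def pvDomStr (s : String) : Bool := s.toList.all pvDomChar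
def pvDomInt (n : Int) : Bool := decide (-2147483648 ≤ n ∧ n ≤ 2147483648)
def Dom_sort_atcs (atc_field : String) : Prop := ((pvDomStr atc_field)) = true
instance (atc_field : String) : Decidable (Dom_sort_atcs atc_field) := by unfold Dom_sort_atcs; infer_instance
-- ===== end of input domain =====

-- B replaces A's separate filter+dedup passes and comparison sort by one fused pass that
-- buckets codes per priority rank and flattens the buckets (objective: alternative).

-- ===== PORT A =====
def ATC_PRIORITY : List String := ["J", "Q", "P", "D", "A", "L", "B", "C", "G", "H", "M", "N", "R", "S", "V"]

-- A's inner _rank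
def rankA (code : String) : Int :=
  let letter : String :=
    match PySem.Str.pyGet? code 0 with
    | some c => String.mk [PySem.Chars.upperChar c]
    | none => "Z"
  match PySem.List.index? ATC_PRIORITY letter with
  | some k => (k : Int)
  | none => (ATC_PRIORITY.length : Int)

-- the comprehension body: strip, keep if non-empty and not "NA"
def stripOkA (c : String) : Option String :=
  if PySem.Str.strip c ≠ "" ∧ PySem.Str.upper (PySem.Str.strip c) ≠ "NA"
  then some (PySem.Str.strip c) else none

-- A's dedup loop body (seen set, codes list)
def dedupStepA (st : PySem.Set String × List String) (c : String) :
    PySem.Set String × List String :=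
  if PySem.Set.contains st.1 c then st else (PySem.Set.add st.1 c, st.2 ++ [c])

def sort_atcs (atc_field : String) : String :=
  if atc_field = "" ∨ PySem.Str.upper (PySem.Str.strip atc_field) = "NA" then ""
  else
    let codes_raw : List String :=
      ((PySem.Str.split? atc_field ",").getD []).filterMap stripOkA
    let st := codes_raw.foldl dedupStepA ((PySem.Set.empty : PySem.Set String), [])
    if st.2 = [] then ""
    else PySem.Str.join "," (PySem.List.sorted st.2 rankA false)

-- ===== PORT B =====
-- rank of a code's first letter; the [] branch is an unreachable totalization default
-- (B only ranks non-empty codes)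
def bucket_index (code : String) : Nat :=
  let c0 : Char := match code.toList with | [] => 'Z' | c :: _ => c
  (PySem.List.index? ATC_PRIORITY (String.mk [PySem.Chars.upperChar c0])).getD ATC_PRIORITY.length

-- B's single-pass loop body: strip, skip empty/"NA"/seen, else append into the rank's bucket
def bucketStepB (st : PySem.Set String × List (List String)) (part : String) :
    PySem.Set String × List (List String) :=
  let code := PySem.Str.strip part
  if code = "" ∨ PySem.Str.upper code = "NA" ∨ PySem.Set.contains st.1 code then st
  else (PySem.Set.add st.1 code, st.2.modify (bucket_index code) (fun b => b ++ [code]))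

def sort_atcs_alt (atc_field : String) : String :=
  if atc_field = "" ∨ PySem.Str.upper (PySem.Str.strip atc_field) = "NA" then ""
  else
    let st := ((PySem.Str.split? atc_field ",").getD []).foldl bucketStepB
      ((PySem.Set.empty : PySem.Set String), List.replicate (ATC_PRIORITY.length + 1) [])
    PySem.Str.join "," st.2.flatten

-- ===== PRECONDITION & SPEC =====
def Spec_sort_atcs (atc_field : String) (out : String) : Prop := out = sort_atcs_alt atc_field
instance (atc_field : String) (out : String) : Decidable (Spec_sort_atcs atc_field out) := by unfold Spec_sort_atcs; infer_instance

-- ===== CLAIM (what is proved, stated in full; the proofs are below) =====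
def Claim_equal_sort_atcs : Prop := ∀ (atc_field : String), Dom_sort_atcs atc_field → Spec_sort_atcs atc_field (sort_atcs atc_field)

-- ===== LEMMAS AND PROOFS =====

lemma pv_rankA_eq (c : String) : rankA c = ((bucket_index c : Nat) : Int) := by
  have h0 : PySem.Str.pyGet? c 0 = c.toList[0]? := by
    simpa using PySem.Str.pyGet?_natCast c 0
  simp only [rankA, bucket_index, h0]
  rcases h : c.toList with _ | ⟨c0, rest⟩
  · have hz : String.mk [PySem.Chars.upperChar 'Z'] = "Z" := rfl
    simp only [List.getElem?_nil, hz]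
    cases hidx : PySem.List.index? ATC_PRIORITY "Z" <;> simp [hidx]
  · simp only [List.getElem?_cons_zero]
    cases hidx : PySem.List.index? ATC_PRIORITY (String.mk [PySem.Chars.upperChar c0]) <;>
      simp [hidx]

lemma pv_bucket_lt (c : String) : bucket_index c < 16 := by
  unfold bucket_index
  have hlen : ATC_PRIORITY.length = 15 := rfl
  rcases h : c.toList with _ | ⟨c0, rest⟩ <;> simp only [h] <;>
    (cases hidx : PySem.List.index? ATC_PRIORITY (String.mk [PySem.Chars.upperChar _]) with
     | none => simp [hlen]
     | some k =>
        obtain ⟨hk, -, -⟩ := PySem.List.getElem_of_index?_eq_some hidx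
        simp only [Option.getD_some]
        omega)

lemma pv_insertBy_append {α : Type} (before : α → α → Bool) (x : α) (P S : List α)
    (h : ∀ y ∈ P, before x y = false) :
    PySem.List.insertBy before x (P ++ S) = P ++ PySem.List.insertBy before x S := by
  induction P with
  | nil => simp
  | cons y t ih =>
    have hy : before x y = false := h y (by simp)
    simp only [List.cons_append, PySem.List.insertBy, hy, Bool.false_eq_true, if_false,
      List.cons.injEq, true_and]
    exact ih (fun z hz => h z (by simp [hz]))

lemma pv_insertBy_head {α : Type} (before : α → α → Bool) (x : α) (S : List α)
    (h : ∀ y ∈ S, before x y = true) :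
    PySem.List.insertBy before x S = x :: S := by
  cases S with
  | nil => simp [PySem.List.insertBy]
  | cons y t => simp [PySem.List.insertBy, h y (by simp)]

lemma pv_flatMap_congr {α β : Type} {l : List α} {f g : α → List β}
    (h : ∀ a ∈ l, f a = g a) : l.flatMap f = l.flatMap g := by
  induction l with
  | nil => simp
  | cons a t ih =>
    simp only [List.flatMap_cons, h a (by simp)]
    rw [ih (fun b hb => h b (by simp [hb]))]

-- a stable sort by a Nat-valued key is the concatenation of its fibers in key order
lemma pv_sorted_buckets {α : Type} (k : α → Nat) (n : Nat) (xs : List α)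
    (h : ∀ c ∈ xs, k c < n) :
    PySem.List.sorted xs (fun c => (k c : Int)) false
      = (List.range n).flatMap (fun i => xs.filter (fun c => k c == i)) := by
  induction xs using List.reverseRecOn with
  | nil => simp [PySem.List.sorted_eq_foldl_insertBy]
  | append_singleton xs x ih =>
    have hx : k x < n := h x (by simp)
    have hxs : ∀ c ∈ xs, k c < n := fun c hc => h c (by simp [hc])
    rw [PySem.List.sorted_eq_foldl_insertBy, List.foldl_append, List.foldl_cons, List.foldl_nil,
        ← PySem.List.sorted_eq_foldl_insertBy, ih hxs]
    have hsplit : List.range n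
        = List.range (k x + 1) ++ (List.range (n - (k x + 1))).map (fun j => (k x + 1) + j) := by
      rw [← List.range_add]; congr 1; omega
    rw [hsplit]
    simp only [List.flatMap_append]
    have hPmem : ∀ y ∈ (List.range (k x + 1)).flatMap (fun i => xs.filter (fun c => k c == i)),
        decide ((k x : Int) < (k y : Int)) = false := by
      intro y hy
      simp only [List.mem_flatMap, List.mem_range, List.mem_filter, beq_iff_eq] at hy
      obtain ⟨i, hi, -, hki⟩ := hy
      simp only [decide_eq_false_iff_not, not_lt, Int.ofNat_le]
      omega
    have hSmem : ∀ y ∈ ((List.range (n - (k x + 1))).map (fun j => (k x + 1) + j)).flatMap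
        (fun i => xs.filter (fun c => k c == i)),
        decide ((k x : Int) < (k y : Int)) = true := by
      intro y hy
      simp only [List.mem_flatMap, List.mem_map, List.mem_range, List.mem_filter,
        beq_iff_eq] at hy
      obtain ⟨i, ⟨j, hj, hij⟩, -, hki⟩ := hy
      simp only [decide_eq_true_eq, Int.ofNat_lt]
      omega
    rw [pv_insertBy_append _ _ _ _ hPmem, pv_insertBy_head _ _ _ hSmem]
    have hfilt : ∀ i, (xs ++ [x]).filter (fun c => k c == i)
        = xs.filter (fun c => k c == i) ++ (if k x = i then [x] else []) := by
      intro i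
      simp only [List.filter_append, List.filter_cons, List.filter_nil]
      by_cases hi : k x = i <;> simp [hi]
    have htail : ((List.range (n - (k x + 1))).map (fun j => (k x + 1) + j)).flatMap
          (fun i => (xs ++ [x]).filter (fun c => k c == i))
        = ((List.range (n - (k x + 1))).map (fun j => (k x + 1) + j)).flatMap
          (fun i => xs.filter (fun c => k c == i)) := by
      apply pv_flatMap_congr
      intro i hi
      simp only [List.mem_map, List.mem_range] at hi
      obtain ⟨j, hj, hij⟩ := hi
      rw [hfilt i, if_neg (by omega), List.append_nil]
    have hhead : (List.range (k x + 1)).flatMap (fun i => (xs ++ [x]).filter (fun c => k c == i))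
        = (List.range (k x + 1)).flatMap (fun i => xs.filter (fun c => k c == i)) ++ [x] := by
      rw [List.range_succ]
      simp only [List.flatMap_append, List.flatMap_cons, List.flatMap_nil, List.append_nil]
      have h1 : (List.range (k x)).flatMap (fun i => (xs ++ [x]).filter (fun c => k c == i))
          = (List.range (k x)).flatMap (fun i => xs.filter (fun c => k c == i)) := by
        apply pv_flatMap_congr
        intro i hi
        simp only [List.mem_range] at hi
        rw [hfilt i, if_neg (by omega), List.append_nil]
      rw [h1, hfilt (k x), if_pos rfl, List.append_assoc]
    rw [htail, hhead]
    simp [List.append_assoc]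

-- modify on a map-over-range acts pointwise at one index
lemma pv_modify_map_range {α : Type} (n r : Nat) (g : α → α) (F : Nat → α) :
    (List.modify ((List.range n).map F) r g)
      = (List.range n).map (fun i => if i = r then g (F i) else F i) := by
  apply List.ext_getElem
  · simp
  · intro i h1 h2
    simp only [List.getElem_modify, List.getElem_map, List.getElem_range]
    rcases eq_or_ne r i with hi | hi
    · simp [hi]
    · simp [hi, Ne.symm hi]

-- the fused single pass of B computes, bucket by bucket, the fibers of A's deduped list
lemma pv_couple (parts : List String) (s : PySem.Set String) (acc : List String) :
    (parts.foldl bucketStepB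
        (s, (List.range 16).map (fun i => acc.filter (fun c => bucket_index c == i)))).2
      = (List.range 16).map (fun i =>
          ((parts.filterMap stripOkA).foldl dedupStepA (s, acc)).2.filter
            (fun c => bucket_index c == i)) := by
  induction parts generalizing s acc with
  | nil => simp
  | cons p ps ih =>
    by_cases h1 : PySem.Str.strip p = "" ∨ PySem.Str.upper (PySem.Str.strip p) = "NA"
    · have hf : stripOkA p = none := by
        unfold stripOkA
        rcases h1 with h | h <;> simp [h]
      have hb : ∀ st : PySem.Set String × List (List String), bucketStepB st p = st := by
        intro st
        unfold bucketStepB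
        rcases h1 with h | h <;> simp [h]
      simp only [List.foldl_cons, List.filterMap_cons, hf, hb]
      exact ih s acc
    · push_neg at h1
      have hf : stripOkA p = some (PySem.Str.strip p) := by
        unfold stripOkA; simp [h1.1, h1.2]
      by_cases h2 : PySem.Str.strip p ∈ s
      · have hb : bucketStepB (s, (List.range 16).map
            (fun i => acc.filter (fun c => bucket_index c == i))) p
            = (s, (List.range 16).map (fun i => acc.filter (fun c => bucket_index c == i))) := by
          simp [bucketStepB, h2]
        have ha : dedupStepA (s, acc) (PySem.Str.strip p) = (s, acc) := by
          simp [dedupStepA, h2]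
        simp only [List.foldl_cons, List.filterMap_cons, hf, hb, ha]
        exact ih s acc
      · have hb : bucketStepB (s, (List.range 16).map
            (fun i => acc.filter (fun c => bucket_index c == i))) p
            = (PySem.Set.add s (PySem.Str.strip p),
               ((List.range 16).map (fun i => acc.filter (fun c => bucket_index c == i))).modify
                 (bucket_index (PySem.Str.strip p)) (fun b => b ++ [PySem.Str.strip p])) := by
          simp [bucketStepB, h1.1, h1.2, h2]
        have ha : dedupStepA (s, acc) (PySem.Str.strip p)
            = (PySem.Set.add s (PySem.Str.strip p), acc ++ [PySem.Str.strip p]) := by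
          simp [dedupStepA, h2]
        have hbk : ((List.range 16).map (fun i => acc.filter (fun c => bucket_index c == i))).modify
              (bucket_index (PySem.Str.strip p)) (fun b => b ++ [PySem.Str.strip p])
            = (List.range 16).map
              (fun i => (acc ++ [PySem.Str.strip p]).filter (fun c => bucket_index c == i)) := by
          rw [pv_modify_map_range]
          apply List.map_congr_left
          intro i hi
          by_cases hr : i = bucket_index (PySem.Str.strip p)
          · simp [hr, List.filter_append, List.filter_cons]
          · have hne : (bucket_index (PySem.Str.strip p) == i) = false := by
              simp only [beq_eq_false_iff_ne, ne_eq]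
              exact fun hh => hr hh.symm
            simp [hr, List.filter_append, hne]
        simp only [List.foldl_cons, List.filterMap_cons, hf, hb, ha, hbk]
        exact ih _ _

-- ===== VERDICT (by name: the statement is the Claim_ definition above) =====
theorem sort_atcs_spec : Claim_equal_sort_atcs := by
  intro x _
  unfold Spec_sort_atcs
  by_cases hg : x = "" ∨ PySem.Str.upper (PySem.Str.strip x) = "NA"
  · simp [sort_atcs, sort_atcs_alt, hg]
  · simp only [sort_atcs, sort_atcs_alt]
    rw [if_neg hg, if_neg hg]
    have hinit : List.replicate (ATC_PRIORITY.length + 1) ([] : List String)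
        = (List.range 16).map
            (fun i => ([] : List String).filter (fun c => bucket_index c == i)) := by
      decide
    rw [hinit, pv_couple ((PySem.Str.split? x ",").getD []) PySem.Set.empty []]
    set codes := ((((PySem.Str.split? x ",").getD []).filterMap stripOkA).foldl dedupStepA
      ((PySem.Set.empty : PySem.Set String), [])).2 with hcodes
    by_cases hc : codes = []
    · rw [if_pos hc, hc]
      simp only [List.filter_nil]
      have hflat : ((List.range 16).map (fun _ : Nat => ([] : List String))).flatten
          = ([] : List String) := by decide
      rw [hflat]
      decide
    · rw [if_neg hc]
      congr 1
      have hk : rankA = fun c => ((bucket_index c : Nat) : Int) := funext pv_rankA_eq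
      rw [hk, pv_sorted_buckets bucket_index 16 codes (fun c _ => pv_bucket_lt c)]
      rw [List.flatMap_def]
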